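-- pv_equiv track=rewrite | github.com/yunior123/hackerrank | bitwise_and.py | countPairs3
-- ===== SOURCE A (Python) =====
-- def countPairs3(arr):
--     res = 0
--     for i in range(1, 31):
--         count = 0
--         for j in range(len(arr)):
--             if arr[j] & (1 << i):
--                 count += 1
--         res += count * (count - 1) // 2
--     return res
-- ===== SOURCE B (Python) =====
-- def countPairs3(arr):
--     # streaming: each element pairs with every EARLIER element sharing bit i (i = 1..30)
--     seen = {}
--     res = 0
--     for x in arr:
--         for i in range(1, 31):
--             if x & (1 << i):
--                 res += seen.get(i, 0)
--                 seen[i] = seen.get(i, 0) + 1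
--     return res
-- ===== Notes on version B (the rewrite author's own statement) =====
-- stated objective: alternative
-- what changed: B streams over arr once, pairing each element with the earlier elements that share each bit via a running per-bit dictionary (res += seen[i] before incrementing), so the pair-count formula count*(count-1)//2 and the 30 repeated scans of A disappear entirely.
import Mathlib
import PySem

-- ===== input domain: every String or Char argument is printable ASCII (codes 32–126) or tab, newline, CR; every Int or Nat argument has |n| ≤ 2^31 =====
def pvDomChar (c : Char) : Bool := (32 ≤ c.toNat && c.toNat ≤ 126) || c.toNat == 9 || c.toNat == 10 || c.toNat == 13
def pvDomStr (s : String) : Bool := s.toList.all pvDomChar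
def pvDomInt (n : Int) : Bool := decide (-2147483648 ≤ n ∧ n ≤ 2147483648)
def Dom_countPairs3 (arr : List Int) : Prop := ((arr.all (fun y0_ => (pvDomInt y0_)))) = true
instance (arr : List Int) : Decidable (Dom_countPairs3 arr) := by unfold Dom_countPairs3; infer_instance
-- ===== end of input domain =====

-- B streams once over arr, pairing each element with the earlier elements sharing each bit
-- via a running per-bit dictionary, instead of A's 30 repeated scans with the C(count,2) formula.

-- Python's '1 << i' for the nonnegative bit index i (shared helper of both ports)
def pvMask (i : Int) : Int := (1 : Int) <<< i.toNat

-- ===== PORT A =====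
def countPairs3 (arr : List Int) : Int :=
  (PySem.List.pyRange 1 31 1).foldl (fun res i =>
    let count : Int :=
      (PySem.List.pyRange 0 (arr.length) 1).foldl (fun count j =>
        if PySem.Int.band (PySem.List.pyGetD arr j 0) (pvMask i) ≠ 0 then count + 1 else count) 0
    res + PySem.Int.floordiv (count * (count - 1)) 2) 0

-- ===== PORT B =====
def countPairs3_alt (arr : List Int) : Int :=
  (arr.foldl (fun (st : Int × PySem.Dict Int Int) x =>
    (PySem.List.pyRange 1 31 1).foldl (fun st i =>
      if PySem.Int.band x (pvMask i) ≠ 0 then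
        (st.1 + st.2.getD i 0, st.2.insert i (st.2.getD i 0 + 1))
      else st) st) ((0 : Int), PySem.Dict.empty)).1

-- ===== PRECONDITION & SPEC =====
def Spec_countPairs3 (arr : List Int) (out : Int) : Prop := out = countPairs3_alt arr
instance (arr : List Int) (out : Int) : Decidable (Spec_countPairs3 arr out) := by unfold Spec_countPairs3; infer_instance

-- ===== CLAIM (what is proved, stated in full; the proofs are below) =====
def Claim_equal_countPairs3 : Prop := ∀ (arr : List Int), Dom_countPairs3 arr → Spec_countPairs3 arr (countPairs3 arr)

-- ===== LEMMAS AND PROOFS =====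

-- the per-bit count of arr (bit i, i : Int)
def pvCnt (i : Int) (arr : List Int) : Int :=
  arr.foldl (fun c x => if PySem.Int.band x (pvMask i) ≠ 0 then c + 1 else c) 0

-- C(c,2) as A computes it
def pvC2 (c : Int) : Int := PySem.Int.floordiv (c * (c - 1)) 2

-- A's inner index loop is the per-bit count
theorem pvCntA (arr : List Int) (i : Int) :
    (PySem.List.pyRange 0 (arr.length) 1).foldl (fun count j =>
      if PySem.Int.band (PySem.List.pyGetD arr j 0) (pvMask i) ≠ 0 then count + 1 else count) 0
      = pvCnt i arr :=
  PySem.List.foldl_pyRange_zero_pyGetD' (β := Int) arr 0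
    (fun c x => if PySem.Int.band x (pvMask i) ≠ 0 then c + 1 else c) 0

-- B's inner loop over a list of bit indices
def pvInner (x : Int) (st : Int × PySem.Dict Int Int) (L : List Int) : Int × PySem.Dict Int Int :=
  L.foldl (fun st i =>
    if PySem.Int.band x (pvMask i) ≠ 0 then
      (st.1 + st.2.getD i 0, st.2.insert i (st.2.getD i 0 + 1))
    else st) st

theorem pvInner_spec (x : Int) (L : List Int) (hnd : L.Nodup) (res : Int) (d : PySem.Dict Int Int) :
    (pvInner x (res, d) L).1 =
      res + (L.map (fun i => if PySem.Int.band x (pvMask i) ≠ 0 then d.getD i 0 else 0)).sum ∧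
    ∀ j : Int, (pvInner x (res, d) L).2.getD j 0 =
      if j ∈ L ∧ PySem.Int.band x (pvMask j) ≠ 0 then d.getD j 0 + 1 else d.getD j 0 := by
  induction L generalizing res d with
  | nil => simp [pvInner]
  | cons i L ih =>
    have hiL : i ∉ L := (List.nodup_cons.mp hnd).1
    have hndL : L.Nodup := (List.nodup_cons.mp hnd).2
    by_cases hb : PySem.Int.band x (pvMask i) ≠ 0
    · have hstep : pvInner x (res, d) (i :: L) =
          pvInner x (res + d.getD i 0, d.insert i (d.getD i 0 + 1)) L := by
        unfold pvInner
        rw [List.foldl_cons, if_pos hb]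
      obtain ⟨h1, h2⟩ := ih hndL (res + d.getD i 0) (d.insert i (d.getD i 0 + 1))
      constructor
      · rw [hstep, h1]
        simp only [List.map_cons, List.sum_cons]
        have hmap : (L.map (fun j => if PySem.Int.band x (pvMask j) ≠ 0 then
            (d.insert i (d.getD i 0 + 1)).getD j 0 else 0)) =
            (L.map (fun j => if PySem.Int.band x (pvMask j) ≠ 0 then d.getD j 0 else 0)) := by
          apply List.map_congr_left
          intro j hj
          have hji : j ≠ i := fun h => hiL (h ▸ hj)
          rw [PySem.Dict.getD_insert]
          simp [hji]
        rw [hmap, if_pos hb]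
        ring
      · intro j
        rw [hstep, h2 j, PySem.Dict.getD_insert]
        by_cases hji : j = i
        · subst hji
          simp [hiL, hb]
        · simp only [if_neg hji, List.mem_cons]
          by_cases hjL : j ∈ L
          · simp [hjL]
          · simp [hjL, hji]
    · have hstep : pvInner x (res, d) (i :: L) = pvInner x (res, d) L := by
        unfold pvInner
        rw [List.foldl_cons, if_neg hb]
      obtain ⟨h1, h2⟩ := ih hndL res d
      constructor
      · rw [hstep, h1, List.map_cons, List.sum_cons, if_neg hb]
        ring
      · intro j
        rw [hstep, h2 j]
        by_cases hji : j = i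
        · subst hji; simp [hb]
        · simp only [List.mem_cons]
          by_cases hjL : j ∈ L
          · simp [hjL]
          · simp [hjL, hji]

-- C(c+1,2) = C(c,2) + c
theorem pvC2_succ (c : Int) : pvC2 (c + 1) = pvC2 c + c := by
  obtain ⟨k, hk⟩ : Even (c * (c - 1)) := by
    have := Int.even_mul_succ_self (c - 1)
    simpa [mul_comm] using this
  have h1 : c * (c - 1) = 2 * k := by omega
  have h2 : (c + 1) * (c + 1 - 1) = 2 * (k + c) := by nlinarith
  unfold pvC2
  rw [h1, h2]
  have e1 : PySem.Int.floordiv (2 * k) 2 = k := by simp [PySem.Int.floordiv]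
  have e2 : PySem.Int.floordiv (2 * (k + c)) 2 = k + c := by simp [PySem.Int.floordiv]
  rw [e1, e2]

-- B's outer loop invariant, by induction on arr from the right
theorem pvOuter (arr : List Int) :
    (arr.foldl (fun (st : Int × PySem.Dict Int Int) x =>
        pvInner x st (PySem.List.pyRange 1 31 1)) ((0 : Int), PySem.Dict.empty)).1 =
      ((PySem.List.pyRange 1 31 1).map (fun i => pvC2 (pvCnt i arr))).sum ∧
    ∀ j ∈ PySem.List.pyRange 1 31 1,
      (arr.foldl (fun (st : Int × PySem.Dict Int Int) x =>
        pvInner x st (PySem.List.pyRange 1 31 1)) ((0 : Int), PySem.Dict.empty)).2.getD j 0 = pvCnt j arr := by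
  induction arr using List.reverseRecOn with
  | nil =>
    constructor
    · simp [pvCnt, pvC2, PySem.Int.floordiv]
    · intro j _; simp [pvCnt]
  | append_singleton l x ih =>
    obtain ⟨hres, hdict⟩ := ih
    set R := PySem.List.pyRange 1 31 1 with hR
    set st := l.foldl (fun (st : Int × PySem.Dict Int Int) x => pvInner x st R) ((0 : Int), PySem.Dict.empty) with hst
    have hfold : (l ++ [x]).foldl (fun (st : Int × PySem.Dict Int Int) y => pvInner y st R)
        ((0 : Int), PySem.Dict.empty) = pvInner x st R := by
      rw [List.foldl_append, List.foldl_cons, List.foldl_nil]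
    have hndR : R.Nodup := hR ▸ PySem.List.nodup_pyRange_one 1 31
    obtain ⟨h1, h2⟩ := pvInner_spec x R hndR st.1 st.2
    have hcnt : ∀ j, pvCnt j (l ++ [x]) =
        pvCnt j l + (if PySem.Int.band x (pvMask j) ≠ 0 then 1 else 0) := by
      intro j
      unfold pvCnt
      rw [List.foldl_append, List.foldl_cons, List.foldl_nil]
      split <;> omega
    constructor
    · rw [hfold, show pvInner x st R = pvInner x (st.1, st.2) R from by rfl, h1, hres]
      have hm : (R.map (fun i => if PySem.Int.band x (pvMask i) ≠ 0 then st.2.getD i 0 else 0)) =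
          (R.map (fun i => if PySem.Int.band x (pvMask i) ≠ 0 then pvCnt i l else 0)) := by
        apply List.map_congr_left
        intro i hi
        by_cases hb : PySem.Int.band x (pvMask i) ≠ 0
        · rw [if_pos hb, if_pos hb, hdict i hi]
        · rw [if_neg hb, if_neg hb]
      rw [hm, ← PySem.List.sum_map_add_int]
      refine congrArg List.sum (List.map_congr_left ?_)
      intro i _
      rw [hcnt i]
      by_cases hb : PySem.Int.band x (pvMask i) ≠ 0
      · rw [if_pos hb, if_pos hb, pvC2_succ]
      · rw [if_neg hb, if_neg hb]
        simp
    · intro j hj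
      rw [hfold, show pvInner x st R = pvInner x (st.1, st.2) R from by rfl, h2 j, hcnt j, hdict j hj]
      by_cases hb : PySem.Int.band x (pvMask j) ≠ 0
      · rw [if_pos ⟨hj, hb⟩, if_pos hb]
      · rw [if_neg (fun h => hb h.2), if_neg hb]
        simp
-- ===== VERDICT (by name: the statement is the Claim_ definition above) =====
theorem countPairs3_spec : Claim_equal_countPairs3 := by
  intro arr _
  unfold Spec_countPairs3
  show countPairs3 arr = countPairs3_alt arr
  unfold countPairs3 countPairs3_alt
  refine Eq.trans (PySem.List.foldl_congr_mem (PySem.List.pyRange 1 31 1) _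
    (fun (res i : Int) => res + pvC2 (pvCnt i arr)) 0 ?_) ?_
  · intro acc i _
    show acc + PySem.Int.floordiv
        (((PySem.List.pyRange 0 (arr.length) 1).foldl (fun count j =>
          if PySem.Int.band (PySem.List.pyGetD arr j 0) (pvMask i) ≠ 0 then count + 1 else count) 0) *
         (((PySem.List.pyRange 0 (arr.length) 1).foldl (fun count j =>
          if PySem.Int.band (PySem.List.pyGetD arr j 0) (pvMask i) ≠ 0 then count + 1 else count) 0) - 1)) 2
        = acc + pvC2 (pvCnt i arr)
    rw [pvCntA]
    rfl
  · rw [PySem.List.foldl_add]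
    have hB := (pvOuter arr).1
    unfold pvInner at hB
    rw [hB]
    simp
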